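-- pv_equiv track=rewrite | github.com/j-miet/BTD6bot | btd6bot/utils/plan_data.py | return_maps_and_strats
-- ===== SOURCE A (Python) =====
-- def return_map(plan: str) -> str:
--     """Returns map name component from a plan.
--
--     Parses map_name substring from a map_nameDifficultyMode string by finding first capital letter in a plan string: it
--     separates map name and difficulty. Then replaces underscores with spaces and returns a copy of this string.
--
--     Args:
--         plan: Plan name string.
--
--     Returns:
--         Map name string.
--     """
--     newplan = plan.replace('_', ' ')
--     for s in newplan:
--         if s.isupper():
--             return newplan[:newplan.index(s)]
--     return ''
--
-- def return_strategy(plan: str) -> str: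
--     """Returns strategy name i.e. difficulty and game mode, from a plan.
--
--     Parses DifficultyMode substring from a map_nameDifficultyMode string, adds a '-' between Difficulty and Mode and
--     returns this new string.
--
--     Args:
--         plan: Plan name string.
--
--     Returns:
--         String in a 'Difficulty-Mode' format.
--     """
--     diff_and_mode = []
--     diff_start_pos = 0
--     mode_start_pos = 0
--     try:
--         for i in range(0, len(plan)):
--             if plan[i].isupper():
--                 diff_start_pos= i
--                 diff_and_mode.append(i)
--                 for j in range(diff_start_pos+1, len(plan)):
--                     if plan[j].isupper():
--                         mode_start_pos = j
--                         diff_and_mode.append(j)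
--                         break
--                 break
--         if diff_start_pos == 0 or mode_start_pos == 0:
--             return ''
--         else:
--             return plan[diff_start_pos:mode_start_pos]+'-'+ plan[mode_start_pos:]
--     except IndexError:
--         return ''
--
-- def return_maps_and_strats(data: list[str]) -> dict[str, list[str]]:
--     """Creates a dictionary with maps as keys and list of different strategies as values for that map.
--
--     Args:
--         data: List of plans, parsed from 'plans' folder.
--
--     Returns:
--         A dictionary with map names as keys, each key corresponding to a list of existing difficulty + game
--             mode combinations for that map.
--     """
--     map_strat: dict[str, list[str]] = {}
--     for d in data:
--         map_name = return_map(d)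
--         strategy_name = return_strategy(d)
--         if map_name != '' and strategy_name != '':
--             if map_name in map_strat:
--                 map_strat[map_name].append(strategy_name)
--             else:
--                 map_strat.update({map_name : [strategy_name]})
--     return map_strat
-- ===== SOURCE B (Python) =====
-- import re
--
-- # One anchored regex does all the parsing: a nonempty run without uppercase letters,
-- # then the Difficulty part (uppercase + following non-uppercase), then the Mode part
-- # (uppercase + anything).  No match -> the plan is skipped, exactly A's guards.
-- _PLAN_RE = re.compile(r'([^A-Z]+)([A-Z][^A-Z]*)([A-Z].*)', re.DOTALL)
--
-- def return_maps_and_strats(data: list[str]) -> dict[str, list[str]]: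
--     # Stage 1: parse every plan declaratively into (map name, strategy) pairs.
--     parsed = [(m.group(1).replace('_', ' '), m.group(2) + '-' + m.group(3))
--               for m in map(_PLAN_RE.fullmatch, data) if m]
--     # Stage 2: group the strategies by map name.
--     map_strat: dict[str, list[str]] = {}
--     for name, strat in parsed:
--         map_strat.setdefault(name, []).append(strat)
--     return map_strat
-- ===== Notes on version B (the rewrite author's own statement) =====
-- stated objective: simpler
-- what changed: A parses each plan with three hand-written index-hunting loops (a scan over a replaced copy plus str.index, and nested range loops for the two uppercase positions); B parses each plan declaratively with one anchored regular expression r'([^A-Z]+)([A-Z][^A-Z]*)([A-Z].*)' in a first stage and groups the resulting (map, strategy) pairs in a separate second stage.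
import Mathlib
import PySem

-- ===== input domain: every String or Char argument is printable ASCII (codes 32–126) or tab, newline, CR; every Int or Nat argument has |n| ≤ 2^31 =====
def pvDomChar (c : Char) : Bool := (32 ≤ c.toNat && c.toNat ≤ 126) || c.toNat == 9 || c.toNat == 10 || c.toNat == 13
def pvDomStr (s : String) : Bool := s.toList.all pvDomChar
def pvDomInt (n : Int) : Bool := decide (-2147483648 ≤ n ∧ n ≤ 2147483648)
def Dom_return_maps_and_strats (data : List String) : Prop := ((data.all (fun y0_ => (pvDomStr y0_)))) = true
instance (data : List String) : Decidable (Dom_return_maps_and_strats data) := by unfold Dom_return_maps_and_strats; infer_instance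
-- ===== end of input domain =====

-- B replaces A's three hand-written index-hunting loops by one anchored regular expression
-- parsing each plan in a first stage and a separate grouping stage (objective: simpler);
-- same return value on every input.

-- ===== PORT A =====
-- 'for s in newplan: if s.isupper(): return newplan[:newplan.index(s)]' of return_map
def pvA_mapLoop (newplan : List Char) : List Char → List Char
  | [] => []
  | c :: rest =>
    if PySem.Chars.isupper c then
      PySem.Chars.slice newplan none (some (PySem.Chars.find newplan [c]))
    else pvA_mapLoop newplan rest

def pvA_return_map (plan : String) : String :=
  let newplan := PySem.Chars.replace plan.toList ['_'] [' ']
  String.ofList (pvA_mapLoop newplan newplan)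

-- inner 'for j in range(diff_start_pos+1, len(plan))' loop of return_strategy; returns
-- mode_start_pos (0 when no uppercase is found, as in A).  plan[j] is ported as pyGetD
-- with default ' ': every index the range loops produce is in range, so the default (and
-- A's dead 'except IndexError') is never reached.
def pvA_stratInner (cs : List Char) : List Int → Int
  | [] => 0
  | j :: rest =>
    if PySem.Chars.isupper (PySem.List.pyGetD cs j ' ') then j else pvA_stratInner cs rest

-- outer 'for i in range(0, len(plan))' loop; returns (diff_start_pos, mode_start_pos)
def pvA_stratOuter (cs : List Char) : List Int → Int × Int
  | [] => (0, 0)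
  | i :: rest =>
    if PySem.Chars.isupper (PySem.List.pyGetD cs i ' ') then
      (i, pvA_stratInner cs (PySem.List.pyRange (i + 1) (cs.length : Int) 1))
    else pvA_stratOuter cs rest

def pvA_return_strategy (plan : String) : String :=
  let cs := plan.toList
  let dm := pvA_stratOuter cs (PySem.List.pyRange 0 (cs.length : Int) 1)
  if dm.1 = 0 ∨ dm.2 = 0 then ""
  else String.ofList (PySem.Chars.slice cs (some dm.1) (some dm.2) ++
                      '-' :: PySem.Chars.slice cs (some dm.2) none)

-- the body of A's 'for d in data' loop
def pvA_step (d : PySem.Dict String (List String)) (pl : String) : PySem.Dict String (List String) :=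
  let map_name := pvA_return_map pl
  let strategy_name := pvA_return_strategy pl
  if map_name ≠ "" ∧ strategy_name ≠ "" then
    if d.contains map_name then d.insert map_name (d.getD map_name [] ++ [strategy_name])
    else d.insert map_name [strategy_name]
  else d

def return_maps_and_strats (data : List String) : List (String × List String) :=
  (data.foldl pvA_step PySem.Dict.empty).items

-- ===== PORT B =====
-- hand port of _PLAN_RE.fullmatch with the fixed pattern r'([^A-Z]+)([A-Z][^A-Z]*)([A-Z].*)'
-- (DOTALL).  The pattern is anchored and deterministic, so fullmatch is exactly: maximal
-- nonempty run without an uppercase letter, then an uppercase letter plus the following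
-- non-uppercase run, then an uppercase letter plus the rest.  Exact on the stated ASCII
-- domain, where the character class [A-Z] coincides with str.isupper.
def pvB_match (cs : List Char) : Option (List Char × List Char × List Char) :=
  let g1 := cs.takeWhile (fun c => !PySem.Chars.isupper c)
  match cs.dropWhile (fun c => !PySem.Chars.isupper c) with
  | [] => none                                  -- no uppercase letter at all
  | c :: t =>
    if g1 = [] then none                        -- group 1 needs at least one character
    else
      match t.dropWhile (fun c => !PySem.Chars.isupper c) with
      | [] => none                              -- no second uppercase letter
      | g3 => some (g1, c :: t.takeWhile (fun c => !PySem.Chars.isupper c), g3)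

-- '(m.group(1).replace('_', ' '), m.group(2) + '-' + m.group(3))'
def pvB_pair (g : List Char × List Char × List Char) : String × String :=
  (String.ofList (PySem.Chars.replace g.1 ['_'] [' ']),
   String.ofList (g.2.1 ++ '-' :: g.2.2))

def return_maps_and_strats_alt (data : List String) : List (String × List String) :=
  -- Stage 1: the list comprehension over map(fullmatch, data) with its 'if m' filter
  let parsed := (data.map (fun p => pvB_match p.toList)).filterMap (fun m => m.map pvB_pair)
  -- Stage 2: the setdefault-append grouping loop
  (parsed.foldl (fun d kv => d.modify kv.1 [] (· ++ [kv.2])) PySem.Dict.empty).items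

-- ===== PRECONDITION & SPEC =====
def Spec_return_maps_and_strats (data : List String) (out : List (String × List String)) : Prop := out = return_maps_and_strats_alt data
instance (data : List String) (out : List (String × List String)) : Decidable (Spec_return_maps_and_strats data out) := by unfold Spec_return_maps_and_strats; infer_instance

-- ===== CLAIM (what is proved, stated in full; the proofs are below) =====
def Claim_equal_return_maps_and_strats : Prop := ∀ (data : List String), Dom_return_maps_and_strats data → Spec_return_maps_and_strats data (return_maps_and_strats data)

-- ===== LEMMAS AND PROOFS =====

-- '_'→' ' as a character map
def pvSub (c : Char) : Char := if c = '_' then ' ' else c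

theorem pvU_sub (c : Char) : PySem.Chars.isupper (pvSub c) = PySem.Chars.isupper c := by
  by_cases h : c = '_'
  · simp [pvSub, h]; decide
  · simp [pvSub, h]

theorem repl_go (fuel : Nat) : ∀ (l acc : List Char), l.length ≤ fuel →
    PySem.Chars.replace.go ['_'] [' '] fuel l acc = acc.reverse ++ l.map pvSub := by
  induction fuel with
  | zero => intro l acc h; rw [List.length_eq_zero_iff.mp (Nat.le_zero.mp h)]; simp [PySem.Chars.replace.go]
  | succ n ih =>
    intro l acc h
    cases l with
    | nil => simp [PySem.Chars.replace.go]
    | cons c t =>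
      by_cases hc : c = '_'
      · subst hc
        have hpc : List.isPrefixOf ['_'] ('_' :: t) = true := by simp [List.isPrefixOf]
        simp only [PySem.Chars.replace.go, hpc, if_pos]
        show PySem.Chars.replace.go ['_'] [' '] n t (' ' :: acc) = _
        rw [ih t (' ' :: acc) (by simpa using Nat.le_of_succ_le_succ h)]
        simp [pvSub]
      · have hpc : List.isPrefixOf ['_'] (c :: t) = false := by
          simp [List.isPrefixOf]; exact fun hh => absurd hh.symm hc
        simp only [PySem.Chars.replace.go, hpc, Bool.false_eq_true, if_neg, not_false_iff]
        rw [ih t (c :: acc) (by simpa using Nat.le_of_succ_le_succ h)]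
        simp [pvSub, hc]

theorem repl_eq (l : List Char) : PySem.Chars.replace l ['_'] [' '] = l.map pvSub := by
  have h : PySem.Chars.replace l ['_'] [' '] = PySem.Chars.replace.go ['_'] [' '] l.length l [] := by
    simp [PySem.Chars.replace]
  rw [h, repl_go l.length l [] le_rfl]; simp

theorem findgo_single (c : Char) : ∀ (l : List Char) (k : Nat),
    PySem.Chars.find.go [c] l k = if c ∈ l then ((k + l.findIdx (· == c) : Nat) : Int) else -1 := by
  intro l
  induction l with
  | nil => intro k; simp [PySem.Chars.find.go]
  | cons x t ih =>
    intro k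
    by_cases hx : c = x
    · subst hx
      have hpc : List.isPrefixOf [c] (c :: t) = true := by simp [List.isPrefixOf]
      simp [PySem.Chars.find.go, hpc, List.findIdx_cons]
    · have hpc : List.isPrefixOf [c] (x :: t) = false := by
        simp [List.isPrefixOf]; exact fun hh => absurd hh hx
      simp only [PySem.Chars.find.go, hpc, Bool.false_eq_true, if_neg, not_false_iff]
      rw [ih (k + 1)]
      have hne : (x == c) = false := by simp; exact fun hh => absurd hh.symm hx
      simp [hx, List.findIdx_cons, hne]
      split_ifs with hmem
      · omega
      · rfl

theorem find_single (l : List Char) (c : Char) :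
    PySem.Chars.find l [c] = if c ∈ l then ((l.findIdx (· == c) : Nat) : Int) else -1 := by
  rw [PySem.Chars.find, findgo_single]; simp

theorem findIdx_pre_append (pre : List Char) (c : Char) (t : List Char)
    (h : ∀ p ∈ pre, PySem.Chars.isupper p = false) (hc : PySem.Chars.isupper c = true) :
    (pre ++ c :: t).findIdx (· == c) = pre.length := by
  induction pre with
  | nil => simp [List.findIdx_cons]
  | cons p ps ih =>
    have hp : (p == c) = false := by
      simp; intro hh; subst hh; rw [h p (by simp)] at hc; exact Bool.false_ne_true hc
    simp [List.findIdx_cons, hp]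
    exact ih (fun q hq => h q (by simp [hq]))

theorem mapLoop_eq (full : List Char) : ∀ (suf pre : List Char), full = pre ++ suf →
    (∀ p ∈ pre, PySem.Chars.isupper p = false) →
    pvA_mapLoop full suf =
      if suf.any PySem.Chars.isupper = true
      then full.take (pre.length + suf.findIdx PySem.Chars.isupper)
      else [] := by
  intro suf
  induction suf with
  | nil => intro pre _ _; simp [pvA_mapLoop]
  | cons c rest ih =>
    intro pre hfull hpre
    by_cases hc : PySem.Chars.isupper c = true
    · have hmem : c ∈ full := by rw [hfull]; simp
      have hidx : full.findIdx (· == c) = pre.length := by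
        rw [hfull]; exact findIdx_pre_append pre c rest hpre hc
      have hcond : (c :: rest).any PySem.Chars.isupper = true := by simp [hc]
      have hfi : (c :: rest).findIdx PySem.Chars.isupper = 0 := by simp [List.findIdx_cons, hc]
      simp only [pvA_mapLoop]
      rw [if_pos hc, find_single, if_pos hmem, hidx, hcond, if_pos rfl, hfi]
      simp only [PySem.Chars.slice]
      rw [PySem.List.slice_to_natCast]
      norm_num
    · have hc' : PySem.Chars.isupper c = false := by simpa using hc
      have hpre' : ∀ p ∈ pre ++ [c], PySem.Chars.isupper p = false := by
        intro p hp
        rcases List.mem_append.mp hp with h | h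
        · exact hpre p h
        · simp at h; subst h; exact hc'
      simp only [pvA_mapLoop]
      rw [if_neg (by simp [hc']), ih (pre ++ [c]) (by simp [hfull]) hpre']
      simp only [List.any_cons, hc', Bool.false_or, List.findIdx_cons, cond_false,
                 List.length_append, List.length_cons, List.length_nil]
      split_ifs with h1
      · congr 1; omega
      · rfl

theorem return_map_eq (plan : String) :
    pvA_return_map plan =
      String.ofList (if plan.toList.any PySem.Chars.isupper = true then
        ((plan.toList.take (plan.toList.findIdx PySem.Chars.isupper)).map pvSub) else []) := by
  simp only [pvA_return_map]
  rw [repl_eq]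
  rw [mapLoop_eq (plan.toList.map pvSub) (plan.toList.map pvSub) [] rfl (by simp)]
  have hany : (plan.toList.map pvSub).any PySem.Chars.isupper = plan.toList.any PySem.Chars.isupper := by
    rw [List.any_map]; congr 1; funext c; exact pvU_sub c
  have hidx : (plan.toList.map pvSub).findIdx PySem.Chars.isupper = plan.toList.findIdx PySem.Chars.isupper := by
    rw [List.findIdx_map]; congr 1; funext c; exact pvU_sub c
  rw [hany, hidx]
  by_cases h : plan.toList.any PySem.Chars.isupper = true <;> simp [h, List.map_take]

theorem stratInner_eq (cs : List Char) : ∀ (k a : Nat), cs.length - a ≤ k →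
    pvA_stratInner cs (PySem.List.pyRange (a : Int) (cs.length : Int) 1) =
      if (cs.drop a).any PySem.Chars.isupper = true
      then ((a + (cs.drop a).findIdx PySem.Chars.isupper : Nat) : Int) else 0 := by
  intro k
  induction k with
  | zero =>
    intro a h
    have hle : cs.length <= a := by omega
    rw [PySem.List.pyRange_one_eq_nil (by exact_mod_cast hle)]
    simp [pvA_stratInner, List.drop_eq_nil_of_le hle]
  | succ n ih =>
    intro a h
    by_cases hlt : a < cs.length
    · rw [PySem.List.pyRange_one_cons (by exact_mod_cast hlt)]
      have hget : PySem.List.pyGetD cs (a : Int) ' ' = cs[a] := by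
        simp [List.getD_eq_getElem?_getD, List.getElem?_eq_getElem hlt]
      have hdrop : cs.drop a = cs[a] :: cs.drop (a + 1) := (List.getElem_cons_drop hlt).symm
      simp only [pvA_stratInner, hget]
      by_cases hu : PySem.Chars.isupper cs[a] = true
      · have hcond : (cs.drop a).any PySem.Chars.isupper = true := by
          rw [hdrop, List.any_cons, hu, Bool.true_or]
        have hfi : (cs.drop a).findIdx PySem.Chars.isupper = 0 := by
          rw [hdrop, List.findIdx_cons, hu, cond_true]
        rw [if_pos hu, hcond, if_pos rfl, hfi]
        norm_num
      · have hu' : PySem.Chars.isupper cs[a] = false := by simpa using hu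
        have hcast : (a : Int) + 1 = ((a + 1 : Nat) : Int) := by push_cast; ring
        have hc1 : (cs.drop a).any PySem.Chars.isupper = (cs.drop (a + 1)).any PySem.Chars.isupper := by
          rw [hdrop, List.any_cons, hu', Bool.false_or]
        have hc2 : (cs.drop a).findIdx PySem.Chars.isupper
            = (cs.drop (a + 1)).findIdx PySem.Chars.isupper + 1 := by
          rw [hdrop, List.findIdx_cons, hu', cond_false]
        rw [if_neg (by simp [hu']), hcast, ih (a + 1) (by omega), hc1, hc2]
        split_ifs with h2
        · push_cast; ring
        · rfl
    · have hle : cs.length <= a := by omega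
      rw [PySem.List.pyRange_one_eq_nil (by exact_mod_cast hle)]
      simp [pvA_stratInner, List.drop_eq_nil_of_le hle]

theorem stratOuter_eq (cs : List Char) : ∀ (k a : Nat), cs.length - a ≤ k →
    pvA_stratOuter cs (PySem.List.pyRange (a : Int) (cs.length : Int) 1) =
      if (cs.drop a).any PySem.Chars.isupper = true then
        (((a + (cs.drop a).findIdx PySem.Chars.isupper : Nat) : Int),
         if (cs.drop (a + (cs.drop a).findIdx PySem.Chars.isupper + 1)).any PySem.Chars.isupper = true
         then ((a + (cs.drop a).findIdx PySem.Chars.isupper + 1 +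
               (cs.drop (a + (cs.drop a).findIdx PySem.Chars.isupper + 1)).findIdx PySem.Chars.isupper : Nat) : Int)
         else 0)
      else (0, 0) := by
  intro k
  induction k with
  | zero =>
    intro a h
    have hle : cs.length <= a := by omega
    rw [PySem.List.pyRange_one_eq_nil (by exact_mod_cast hle)]
    simp [pvA_stratOuter, List.drop_eq_nil_of_le hle]
  | succ n ih =>
    intro a h
    by_cases hlt : a < cs.length
    · rw [PySem.List.pyRange_one_cons (by exact_mod_cast hlt)]
      have hget : PySem.List.pyGetD cs (a : Int) ' ' = cs[a] := by
        simp [List.getD_eq_getElem?_getD, List.getElem?_eq_getElem hlt]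
      have hdrop : cs.drop a = cs[a] :: cs.drop (a + 1) := (List.getElem_cons_drop hlt).symm
      have hcast : (a : Int) + 1 = ((a + 1 : Nat) : Int) := by push_cast; ring
      simp only [pvA_stratOuter, hget]
      by_cases hu : PySem.Chars.isupper cs[a] = true
      · have hcond : (cs.drop a).any PySem.Chars.isupper = true := by
          rw [hdrop, List.any_cons, hu, Bool.true_or]
        have hfi : (cs.drop a).findIdx PySem.Chars.isupper = 0 := by
          rw [hdrop, List.findIdx_cons, hu, cond_true]
        rw [if_pos hu, hcast, stratInner_eq cs cs.length (a + 1) (by omega), hcond, if_pos rfl, hfi]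
        norm_num
      · have hu' : PySem.Chars.isupper cs[a] = false := by simpa using hu
        have hc1 : (cs.drop a).any PySem.Chars.isupper = (cs.drop (a + 1)).any PySem.Chars.isupper := by
          rw [hdrop, List.any_cons, hu', Bool.false_or]
        have hc2 : (cs.drop a).findIdx PySem.Chars.isupper
            = (cs.drop (a + 1)).findIdx PySem.Chars.isupper + 1 := by
          rw [hdrop, List.findIdx_cons, hu', cond_false]
        rw [if_neg (by simp [hu']), hcast, ih (a + 1) (by omega), hc1, hc2]
        have e : a + ((cs.drop (a + 1)).findIdx PySem.Chars.isupper + 1) + 1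
            = a + 1 + (cs.drop (a + 1)).findIdx PySem.Chars.isupper + 1 := by omega
        rw [e]
        split_ifs <;> first | rfl | (congr 1 <;> omega)
    · have hle : cs.length <= a := by omega
      rw [PySem.List.pyRange_one_eq_nil (by exact_mod_cast hle)]
      simp [pvA_stratOuter, List.drop_eq_nil_of_le hle]

theorem return_strategy_eq (plan : String) :
    pvA_return_strategy plan =
      if plan.toList.any PySem.Chars.isupper = true ∧
         0 < plan.toList.findIdx PySem.Chars.isupper ∧
         (plan.toList.drop (plan.toList.findIdx PySem.Chars.isupper + 1)).any PySem.Chars.isupper = true then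
        String.ofList (PySem.Chars.slice plan.toList
            (some ((plan.toList.findIdx PySem.Chars.isupper : Nat) : Int))
            (some (((plan.toList.findIdx PySem.Chars.isupper : Nat) : Int) + 1 +
              (((plan.toList.drop (plan.toList.findIdx PySem.Chars.isupper + 1)).findIdx PySem.Chars.isupper : Nat) : Int))) ++
          '-' :: PySem.Chars.slice plan.toList
            (some (((plan.toList.findIdx PySem.Chars.isupper : Nat) : Int) + 1 +
              (((plan.toList.drop (plan.toList.findIdx PySem.Chars.isupper + 1)).findIdx PySem.Chars.isupper : Nat) : Int))) none)
      else "" := by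
  simp only [pvA_return_strategy]
  set cs := plan.toList with hcsdef
  set F := cs.findIdx PySem.Chars.isupper with hFdef
  set J := (cs.drop (F + 1)).findIdx PySem.Chars.isupper with hJdef
  have hOut := stratOuter_eq cs cs.length 0 (by omega)
  push_cast at hOut
  simp only [zero_add, List.drop_zero] at hOut
  by_cases hany : cs.any PySem.Chars.isupper = true
  · by_cases hF : 0 < F
    · by_cases hsec : (cs.drop (F + 1)).any PySem.Chars.isupper = true
      · rw [if_pos hany, if_pos hsec] at hOut
        have h1 : (pvA_stratOuter cs (PySem.List.pyRange 0 (cs.length : Int) 1)).1 = (F : Int) := by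
          rw [hOut]
        have h2 : (pvA_stratOuter cs (PySem.List.pyRange 0 (cs.length : Int) 1)).2
            = (F : Int) + 1 + (J : Int) := by rw [hOut]
        have hno : ¬((F : Int) = 0 ∨ (F : Int) + 1 + (J : Int) = 0) := by
          rintro (h | h) <;> omega
        have hyes : cs.any PySem.Chars.isupper = true ∧ 0 < F ∧
            (cs.drop (F + 1)).any PySem.Chars.isupper = true := ⟨hany, hF, hsec⟩
        rw [h1, h2, if_neg hno, if_pos hyes]
      · rw [if_pos hany, if_neg hsec] at hOut
        have h2 : (pvA_stratOuter cs (PySem.List.pyRange 0 (cs.length : Int) 1)).2 = 0 := by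
          rw [hOut]
        have hc : (pvA_stratOuter cs (PySem.List.pyRange 0 (cs.length : Int) 1)).1 = 0 ∨ (0 : Int) = 0 :=
          Or.inr rfl
        have hno : ¬(cs.any PySem.Chars.isupper = true ∧ 0 < F ∧
            (cs.drop (F + 1)).any PySem.Chars.isupper = true) := fun h => hsec h.2.2
        rw [h2, if_pos hc, if_neg hno]
    · rw [if_pos hany] at hOut
      have hF0 : F = 0 := by omega
      have h1 : (pvA_stratOuter cs (PySem.List.pyRange 0 (cs.length : Int) 1)).1 = (F : Int) := by
        rw [hOut]
      have hc : (F : Int) = 0 ∨ (pvA_stratOuter cs (PySem.List.pyRange 0 (cs.length : Int) 1)).2 = 0 :=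
        Or.inl (by exact_mod_cast hF0)
      have hno : ¬(cs.any PySem.Chars.isupper = true ∧ 0 < F ∧
          (cs.drop (F + 1)).any PySem.Chars.isupper = true) := fun h => hF h.2.1
      rw [h1, if_pos hc, if_neg hno]
  · rw [if_neg hany] at hOut
    have h1 : (pvA_stratOuter cs (PySem.List.pyRange 0 (cs.length : Int) 1)).1 = 0 := by
      rw [hOut]
    have hc : (0 : Int) = 0 ∨ (pvA_stratOuter cs (PySem.List.pyRange 0 (cs.length : Int) 1)).2 = 0 :=
      Or.inl rfl
    have hno : ¬(cs.any PySem.Chars.isupper = true ∧ 0 < F ∧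
        (cs.drop (F + 1)).any PySem.Chars.isupper = true) := fun h => hany h.1
    rw [h1, if_pos hc, if_neg hno]

-- takeWhile/dropWhile on the negated predicate, in terms of findIdx
theorem tw_dw (cs : List Char) :
    cs.takeWhile (fun c => !PySem.Chars.isupper c) = cs.take (cs.findIdx PySem.Chars.isupper) ∧
    cs.dropWhile (fun c => !PySem.Chars.isupper c) = cs.drop (cs.findIdx PySem.Chars.isupper) := by
  induction cs with
  | nil => simp
  | cons c t ih =>
    by_cases hc : PySem.Chars.isupper c = true
    · simp [List.findIdx_cons, hc]
    · have hc' : PySem.Chars.isupper c = false := by simpa using hc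
      simp [List.findIdx_cons, hc', ih.1, ih.2]

theorem modify_eq_A_branch (d : PySem.Dict String (List String)) (k : String) (v : String) :
    d.modify k [] (· ++ [v]) =
      if d.contains k then d.insert k (d.getD k [] ++ [v]) else d.insert k [v] := by
  by_cases h : d.contains k = true
  · simp [PySem.Dict.modify, h]
  · have h' : d.contains k = false := by simpa using h
    simp [PySem.Dict.modify, h', PySem.Dict.getD_of_not_contains d ([] : List String) h']

theorem mk_ne_empty (l : List Char) (h : l ≠ []) : String.ofList l ≠ "" := by
  intro hh; apply h
  have h2 := congrArg String.toList hh
  simpa using h2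

-- A's loop body equals the match-and-modify step induced by B's regex parse
theorem step_match (d : PySem.Dict String (List String)) (pl : String) :
    pvA_step d pl =
      (match pvB_match pl.toList with
       | some g => d.modify (pvB_pair g).1 [] (· ++ [(pvB_pair g).2])
       | none => d) := by
  simp only [pvA_step]
  rw [return_map_eq, return_strategy_eq]
  set cs := pl.toList with hcsdef
  set F := cs.findIdx PySem.Chars.isupper with hFdef
  set J := (cs.drop (F + 1)).findIdx PySem.Chars.isupper with hJdef
  by_cases hany : cs.any PySem.Chars.isupper = true
  · have hFlt : F < cs.length := by
      rw [hFdef]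
      exact List.findIdx_lt_length.mpr (by simpa using List.any_eq_true.mp hany)
    have hdropF : cs.drop F = cs[F] :: cs.drop (F + 1) := (List.getElem_cons_drop hFlt).symm
    have huF : PySem.Chars.isupper cs[F] = true := List.findIdx_getElem (w := hFlt)
    have hm0 : pvB_match cs =
        (if cs.take F = [] then none
         else
           match (cs.drop (F + 1)).dropWhile (fun c => !PySem.Chars.isupper c) with
           | [] => none
           | g3 => some (cs.take F, cs[F] ::
               (cs.drop (F + 1)).takeWhile (fun c => !PySem.Chars.isupper c), g3)) := by
      simp only [pvB_match, (tw_dw cs).1, (tw_dw cs).2, ← hFdef, hdropF]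
    by_cases hF : 0 < F
    · have hg1ne : cs.take F ≠ [] := by
        simp only [ne_eq, List.take_eq_nil_iff, not_or]
        exact ⟨by omega, by intro hnil; rw [hnil] at hFlt; simp at hFlt⟩
      by_cases hsec : (cs.drop (F + 1)).any PySem.Chars.isupper = true
      · -- full match: both sides add the same pair
        have hJlt : J < (cs.drop (F + 1)).length := by
          rw [hJdef]
          exact List.findIdx_lt_length.mpr (by simpa using List.any_eq_true.mp hsec)
        have hdropJ : (cs.drop (F + 1)).drop J
            = (cs.drop (F + 1))[J] :: (cs.drop (F + 1)).drop (J + 1) :=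
          (List.getElem_cons_drop hJlt).symm
        have hg3ne : (cs.drop (F + 1)).drop J ≠ [] := by rw [hdropJ]; simp
        have hm : pvB_match cs = some (cs.take F,
            cs[F] :: (cs.drop (F + 1)).take J, (cs.drop (F + 1)).drop J) := by
          rw [hm0, if_neg (by simpa using hg1ne)]
          have hdw := (tw_dw (cs.drop (F + 1))).2
          have htw := (tw_dw (cs.drop (F + 1))).1
          rw [← hJdef] at hdw htw
          cases hcase : (cs.drop (F + 1)).dropWhile (fun c => !PySem.Chars.isupper c) with
          | nil => rw [hcase] at hdw; exact absurd hdw.symm hg3ne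
          | cons x xs =>
            simp only
            rw [← hcase, hdw, htw]
        -- evaluate the A-side guard
        have hyes : cs.any PySem.Chars.isupper = true ∧ 0 < F ∧
            (cs.drop (F + 1)).any PySem.Chars.isupper = true := ⟨hany, hF, hsec⟩
        rw [if_pos hany, if_pos hyes, hm]
        have hmapne : String.ofList ((cs.take F).map pvSub) ≠ "" := by
          apply mk_ne_empty; simpa using hg1ne
        have hstratne : String.ofList (PySem.Chars.slice cs (some (F : Int))
              (some ((F : Int) + 1 + (J : Int))) ++
            '-' :: PySem.Chars.slice cs (some ((F : Int) + 1 + (J : Int))) none) ≠ "" := by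
          apply mk_ne_empty; simp
        rw [if_pos ⟨hmapne, hstratne⟩, ← modify_eq_A_branch]
        -- identify key and value
        have hkey : (pvB_pair (cs.take F, cs[F] :: (cs.drop (F + 1)).take J,
            (cs.drop (F + 1)).drop J)).1 = String.ofList ((cs.take F).map pvSub) := by
          simp [pvB_pair, repl_eq]
        have hcastFJ : (F : Int) + 1 + (J : Int) = ((F + 1 + J : Nat) : Int) := by push_cast; ring
        have hs1 : PySem.Chars.slice cs (some (F : Int)) (some ((F : Int) + 1 + (J : Int)))
            = cs[F] :: (cs.drop (F + 1)).take J := by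
          rw [hcastFJ]
          simp only [PySem.Chars.slice_eq_listSlice]
          rw [PySem.List.slice_natCast]
          have : F + 1 + J - F = J + 1 := by omega
          rw [this, hdropF]
          simp only [List.take_succ_cons]
        have hs2 : PySem.Chars.slice cs (some ((F : Int) + 1 + (J : Int))) none
            = (cs.drop (F + 1)).drop J := by
          have e : (cs.drop (F + 1)).drop J = cs.drop (F + 1 + J) := by
            rw [List.drop_drop]
          rw [hcastFJ]
          simp only [PySem.Chars.slice_eq_listSlice]
          rw [PySem.List.slice_from_natCast, ← e]
        have hval : (pvB_pair (cs.take F, cs[F] :: (cs.drop (F + 1)).take J,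
            (cs.drop (F + 1)).drop J)).2
            = String.ofList (PySem.Chars.slice cs (some (F : Int))
                (some ((F : Int) + 1 + (J : Int))) ++
              '-' :: PySem.Chars.slice cs (some ((F : Int) + 1 + (J : Int))) none) := by
          simp only [pvB_pair]; rw [hs1, hs2]
        have hred : (match some (cs.take F, cs[F] :: (cs.drop (F + 1)).take J, (cs.drop (F + 1)).drop J) with
             | some g => d.modify (pvB_pair g).1 [] (· ++ [(pvB_pair g).2])
             | none => d)
            = d.modify (pvB_pair (cs.take F, cs[F] :: (cs.drop (F + 1)).take J,
                (cs.drop (F + 1)).drop J)).1 []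
              (· ++ [(pvB_pair (cs.take F, cs[F] :: (cs.drop (F + 1)).take J,
                (cs.drop (F + 1)).drop J)).2]) := rfl
        rw [hred, hkey, hval]
      · -- no second uppercase: no match, A's strategy is '' so both sides give d
        have hdwnil : (cs.drop (F + 1)).dropWhile (fun c => !PySem.Chars.isupper c) = [] := by
          rw [(tw_dw (cs.drop (F + 1))).2, ← hJdef]
          have hsec' : (cs.drop (F + 1)).any PySem.Chars.isupper = false := by simpa using hsec
          have : J = (cs.drop (F + 1)).length := by
            rw [hJdef]
            by_contra hne
            have hlt : (cs.drop (F + 1)).findIdx PySem.Chars.isupper < (cs.drop (F + 1)).length :=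
              lt_of_le_of_ne (List.findIdx_le_length) hne
            have := List.findIdx_getElem (w := hlt)
            rw [List.any_eq_false] at hsec'
            exact absurd this (by simpa using hsec' _ (List.getElem_mem hlt))
          rw [this]; exact List.drop_length
        have hm : pvB_match cs = none := by
          rw [hm0, if_neg (by simpa using hg1ne), hdwnil]
        have hno : ¬(cs.any PySem.Chars.isupper = true ∧ 0 < F ∧
            (cs.drop (F + 1)).any PySem.Chars.isupper = true) := fun h => hsec h.2.2
        rw [if_pos hany, if_neg hno, hm]
        exact if_neg (fun h => h.2 rfl)
    · -- first uppercase at index 0: group 1 empty, no match; A's map name is ''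
      have hF0 : F = 0 := by omega
      have hg1nil : cs.take F = [] := by rw [hF0]; simp
      have hm : pvB_match cs = none := by rw [hm0, if_pos hg1nil]
      have hno : ¬(cs.any PySem.Chars.isupper = true ∧ 0 < F ∧
          (cs.drop (F + 1)).any PySem.Chars.isupper = true) := fun h => hF h.2.1
      rw [if_pos hany, if_neg hno, hm]
      refine if_neg (fun h => ?_)
      rw [hF0] at h
      simp at h
  · -- no uppercase at all: no match; A's map name is ''
    have hdwnil : cs.dropWhile (fun c => !PySem.Chars.isupper c) = [] := by
      rw [(tw_dw cs).2]
      have hany' : cs.any PySem.Chars.isupper = false := by simpa using hany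
      have : F = cs.length := by
        rw [hFdef]
        by_contra hne
        have hlt : cs.findIdx PySem.Chars.isupper < cs.length :=
          lt_of_le_of_ne (List.findIdx_le_length) hne
        have := List.findIdx_getElem (w := hlt)
        rw [List.any_eq_false] at hany'
        exact absurd this (by simpa using hany' _ (List.getElem_mem hlt))
      rw [← hFdef, this]; exact List.drop_length
    have hm : pvB_match cs = none := by
      simp only [pvB_match, hdwnil]
    have hno : ¬(cs.any PySem.Chars.isupper = true ∧ 0 < F ∧
        (cs.drop (F + 1)).any PySem.Chars.isupper = true) := fun h => hany h.1
    rw [if_neg hany, if_neg hno, hm]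
    exact if_neg (fun h => h.2 rfl)

-- folding B's parsed pairs is folding A's step over the plans
theorem fold_parsed (data : List String) : ∀ (d : PySem.Dict String (List String)),
    ((data.map (fun p => pvB_match p.toList)).filterMap (fun m => m.map pvB_pair)).foldl
      (fun d kv => d.modify kv.1 [] (· ++ [kv.2])) d
    = data.foldl pvA_step d := by
  induction data with
  | nil => intro d; rfl
  | cons p rest ih =>
    intro d
    simp only [List.map_cons, List.filterMap_cons, List.foldl_cons]
    rw [step_match d p]
    cases hm : pvB_match p.toList with
    | none => simp only [Option.map_none]; exact ih d
    | some g => simp only [Option.map_some, List.foldl_cons]; exact ih _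

-- ===== VERDICT (by name: the statement is the Claim_ definition above) =====
theorem return_maps_and_strats_spec : Claim_equal_return_maps_and_strats := by
  intro data _
  unfold Spec_return_maps_and_strats return_maps_and_strats return_maps_and_strats_alt
  exact congrArg PySem.Dict.items (fold_parsed data PySem.Dict.empty).symm
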